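-- pv_equiv track=rewrite | github.com/bluechry/EPIJudge | epi_judge_python_solutions/closest_int_same_weight.py | closest_int_same_bit_count_1
-- ===== SOURCE A (Python) =====
-- def closest_int_same_bit_count_1(x: int) -> int:
--     def swap_adjacent_bits(val: int, i: int) -> int:
--         bit_mask = (1 << i) | (1 << (i + 1))
--         return val ^ bit_mask
--
--     num_bits = 64
--     inf = float('inf')
--
--     # Find the previous number.
--     for i in range(num_bits - 1):
--         if ((x >> (i + 1)) & 1) == 1 and ((x >> i) & 1) == 0:
--             prev_x = swap_adjacent_bits(x, i)
--             break
--     else: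
--         prev_x = inf
--
--     # Find the next number.
--     for i in range(num_bits - 1):
--         if ((x >> (i + 1)) & 1) == 0 and ((x >> i) & 1) == 1:
--             next_x = swap_adjacent_bits(x, i)
--             break
--     else:
--         next_x = inf
--
--     if next_x == inf and prev_x == inf:
--         raise ValueError("All bits are 0 or 1.")
--
--     return prev_x if abs(prev_x - x) < abs(next_x - x) else next_x
-- ===== SOURCE B (Python) =====
-- def closest_int_same_bit_count_1(x: int) -> int:
--     # Single scan: swapping the lowest differing adjacent bit pair (cost 2^i)
--     # is always the closest integer with the same bit count.
--     for i in range(63):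
--         if ((x >> i) & 1) != ((x >> (i + 1)) & 1):
--             return x ^ ((1 << i) | (1 << (i + 1)))
--     raise ValueError('All bits are 0 or 1.')
-- ===== Notes on version B (the rewrite author's own statement) =====
-- stated objective: simpler
-- what changed: A single scan for the lowest adjacent bit pair that differs (swapped immediately and returned) replaces A's two separate searches (previous and next candidate) plus the final abs-distance comparison.
import Mathlib
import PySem

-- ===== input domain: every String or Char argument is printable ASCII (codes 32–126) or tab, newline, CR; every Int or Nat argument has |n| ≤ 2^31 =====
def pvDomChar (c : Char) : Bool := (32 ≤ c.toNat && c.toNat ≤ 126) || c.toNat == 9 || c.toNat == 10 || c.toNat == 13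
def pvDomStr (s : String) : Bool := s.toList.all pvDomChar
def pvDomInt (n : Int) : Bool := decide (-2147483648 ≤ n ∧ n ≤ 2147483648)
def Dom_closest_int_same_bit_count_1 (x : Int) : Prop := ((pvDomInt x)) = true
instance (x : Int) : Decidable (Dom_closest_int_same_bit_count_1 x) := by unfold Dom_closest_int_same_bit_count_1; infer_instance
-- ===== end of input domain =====

-- B replaces A's two searches (previous/next candidate) and abs-distance comparison by a
-- single scan that swaps the lowest differing adjacent bit pair; return values proved equal on Pre_.


-- ===== PORT A =====
-- helper: Python's swap_adjacent_bits(val, i) = val ^ ((1 << i) | (1 << (i+1)))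
def pvSwapAdjacentBits (val : Int) (i : Nat) : Int :=
  PySem.Int.bxor val (PySem.Int.bor (1 <<< i) (1 <<< (i + 1)))

-- A's first loop: first i in range(63) with (x >> (i+1)) & 1 == 1 and (x >> i) & 1 == 0;
-- none = the loop's else branch (prev_x = inf).
def pvPrevLoop (x : Int) (i : Nat) : Option Int :=
  if _h : i < 63 then
    if PySem.Int.band (x >>> (i + 1)) 1 == 1 && PySem.Int.band (x >>> i) 1 == 0 then
      some (pvSwapAdjacentBits x i)
    else pvPrevLoop x (i + 1)
  else none
termination_by 63 - i

-- A's second loop (next_x), same shape with the bit tests exchanged.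
def pvNextLoop (x : Int) (i : Nat) : Option Int :=
  if _h : i < 63 then
    if PySem.Int.band (x >>> (i + 1)) 1 == 0 && PySem.Int.band (x >>> i) 1 == 1 then
      some (pvSwapAdjacentBits x i)
    else pvNextLoop x (i + 1)
  else none
termination_by 63 - i

-- none plays float('inf'): abs(inf - x) compares greater than any finite distance.
def closest_int_same_bit_count_1 (x : Int) : Int :=
  match pvPrevLoop x 0, pvNextLoop x 0 with
  | none, none => 0                                   -- Python raises ValueError here; excluded by Pre_
  | some p, none => p                                 -- abs(p - x) < inf
  | none, some n => n                                 -- inf < abs(n - x) is false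
  | some p, some n => if |p - x| < |n - x| then p else n

-- ===== PORT B =====
-- single scan: first i in range(63) whose bit differs from bit i+1, swap and return.
def pvAltScan (x : Int) (i : Nat) : Int :=
  if _h : i < 63 then
    if PySem.Int.band (x >>> i) 1 != PySem.Int.band (x >>> (i + 1)) 1 then
      PySem.Int.bxor x (PySem.Int.bor (1 <<< i) (1 <<< (i + 1)))
    else pvAltScan x (i + 1)
  else 0                                              -- Python raises ValueError here; excluded by Pre_
termination_by 63 - i

def closest_int_same_bit_count_1_alt (x : Int) : Int := pvAltScan x 0

-- ===== PRECONDITION & SPEC =====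
-- Pre_ excludes exactly the inputs on which the Python A raises ValueError('All bits are 0 or 1.'):
-- those whose low 64 bits are all equal (x ≡ 0 or -1 mod 2^64); B raises the same error there.
def Pre_closest_int_same_bit_count_1 (x : Int) : Prop :=
  ∃ i : Nat, i < 63 ∧ PySem.Int.band (x >>> i) 1 ≠ PySem.Int.band (x >>> (i + 1)) 1
instance (x : Int) : Decidable (Pre_closest_int_same_bit_count_1 x) := by
  unfold Pre_closest_int_same_bit_count_1; infer_instance

def pvWitness_closest_int_same_bit_count_1 : Int := 2

def Spec_closest_int_same_bit_count_1 (x : Int) (out : Int) : Prop := out = closest_int_same_bit_count_1_alt x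
instance (x : Int) (out : Int) : Decidable (Spec_closest_int_same_bit_count_1 x out) := by unfold Spec_closest_int_same_bit_count_1; infer_instance

-- ===== CLAIM (what is proved, stated in full; the proofs are below) =====
def Claim_equal_closest_int_same_bit_count_1 : Prop := ∀ (x : Int), Dom_closest_int_same_bit_count_1 x → Pre_closest_int_same_bit_count_1 x → Spec_closest_int_same_bit_count_1 x (closest_int_same_bit_count_1 x)

-- ===== LEMMAS AND PROOFS =====

-- the bit test '(x >> k) & 1' is the k-th bit, as floor division then emod
lemma pvBit_eq (x : Int) (k : Nat) :
    PySem.Int.band (x >>> k) 1 = x / 2 ^ k % 2 := by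
  rw [PySem.Int.band_one, PySem.Int.mod_eq_emod_of_pos (by norm_num), Int.shiftRight_eq_div_pow]
  push_cast
  ring_nf

lemma pvBit_cases (x : Int) (k : Nat) : x / 2 ^ k % 2 = 0 ∨ x / 2 ^ k % 2 = 1 := by omega

-- bits of a nonnegative integer are Nat.testBit
lemma bit_ofNat (n k : Nat) : ((n : Int)) / 2 ^ k % 2 = if n.testBit k then 1 else 0 := by
  rw [Nat.testBit_eq_decide_div_mod_eq]
  have h1 : ((n : Int)) / 2 ^ k % 2 = ((n / 2 ^ k % 2 : Nat) : Int) := by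
    rw [Int.natCast_emod, Int.natCast_ediv]; push_cast; ring_nf
  rw [h1]
  rcases Nat.mod_two_eq_zero_or_one (n / 2 ^ k) with h | h <;> simp [h]

-- parity of a Nat xor
lemma xor_mod_two (a b : Nat) : (a ^^^ b) % 2 = a % 2 ^^^ b % 2 := by
  have h := Nat.testBit_xor a b 0
  rw [Nat.testBit_zero, Nat.testBit_zero, Nat.testBit_zero] at h
  rcases Nat.mod_two_eq_zero_or_one a with ha | ha <;>
    rcases Nat.mod_two_eq_zero_or_one b with hb | hb <;>
      rcases Nat.mod_two_eq_zero_or_one (a ^^^ b) with hc | hc <;>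
        simp [ha, hb, hc] at h ⊢

-- core Nat fact: xor-ing the mask at a (0,1)-pair at (i, i+1) subtracts 2^i
lemma natSwap : ∀ (i n : Nat), n.testBit i = false → n.testBit (i + 1) = true →
    (n ^^^ (2 ^ i + 2 ^ (i + 1))) + 2 ^ i = n := by
  intro i
  induction i with
  | zero =>
    intro n h0 h1
    rw [Nat.testBit_zero] at h0
    simp at h0
    have hn0 : n % 2 = 0 := by omega
    have h1' : (n / 2).testBit 0 = true := by rw [Nat.testBit_div_two]; exact h1
    rw [Nat.testBit_zero] at h1'
    simp at h1'
    have hy3 : n ^^^ (2 ^ 0 + 2 ^ 1) = n ^^^ 3 := by norm_num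
    have hym : (n ^^^ 3) % 2 = 1 := by
      rw [xor_mod_two, hn0]; decide
    have hyd : (n ^^^ 3) / 2 = n / 2 ^^^ 1 := by
      rw [Nat.xor_div_two]
    have hzm : (n / 2 ^^^ 1) % 2 = 0 := by
      rw [xor_mod_two, h1']; decide
    have hzd : (n / 2 ^^^ 1) / 2 = n / 2 / 2 := by rw [Nat.xor_div_two]; simp
    rw [hy3, pow_zero]
    omega
  | succ i ih =>
    intro n h0 h1
    have hmask : 2 ^ (i + 1) + 2 ^ (i + 1 + 1) = 2 * (2 ^ i + 2 ^ (i + 1)) := by ring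
    have hym : (n ^^^ (2 ^ (i + 1) + 2 ^ (i + 1 + 1))) % 2 = n % 2 := by
      rw [xor_mod_two]
      have h2 : (2 ^ (i + 1) + 2 ^ (i + 1 + 1)) % 2 = 0 := by
        rw [hmask]; omega
      rw [h2]
      simp
    have hyd : (n ^^^ (2 ^ (i + 1) + 2 ^ (i + 1 + 1))) / 2 = n / 2 ^^^ (2 ^ i + 2 ^ (i + 1)) := by
      rw [Nat.xor_div_two, hmask, Nat.mul_div_cancel_left _ (by norm_num : 0 < 2)]
    have hh0 : (n / 2).testBit i = false := by rw [Nat.testBit_div_two]; exact h0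
    have hh1 : (n / 2).testBit (i + 1) = true := by rw [Nat.testBit_div_two]; exact h1
    have hih := ih (n / 2) hh0 hh1
    rw [← hyd] at hih
    set d := n ^^^ (2 ^ (i + 1) + 2 ^ (i + 1 + 1)) with hd
    generalize hq : (2 : Nat) ^ i = q at hih
    have hp2 : (2 : Nat) ^ (i + 1) = 2 * q := by rw [← hq]; ring
    rw [hp2]
    omega

-- the mask's own bits at i and i+1 are set
lemma mask_testBit (i : Nat) :
    (2 ^ i + 2 ^ (i + 1)).testBit i = true ∧ (2 ^ i + 2 ^ (i + 1)).testBit (i + 1) = true := by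
  have h3 : 2 ^ i + 2 ^ (i + 1) = 2 ^ i * 3 + 0 := by ring
  rw [h3]
  constructor
  · rw [Nat.testBit_two_pow_mul_add 3 (by positivity) i]; simp
  · rw [Nat.testBit_two_pow_mul_add 3 (by positivity) (i + 1)]
    simp [show ¬ (i + 1 < i) by omega, show i + 1 - i = 1 by omega]
    decide

-- the symmetric Nat fact: a (1,0)-pair at (i, i+1) gains 2^i
lemma natSwap' (i n : Nat) (h0 : n.testBit i = true) (h1 : n.testBit (i + 1) = false) :
    n ^^^ (2 ^ i + 2 ^ (i + 1)) = n + 2 ^ i := by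
  set y := n ^^^ (2 ^ i + 2 ^ (i + 1)) with hy
  obtain ⟨hm0, hm1⟩ := mask_testBit i
  have hy0 : y.testBit i = false := by
    rw [hy, Nat.testBit_xor, h0, hm0]; rfl
  have hy1 : y.testBit (i + 1) = true := by
    rw [hy, Nat.testBit_xor, h1, hm1]; rfl
  have := natSwap i y hy0 hy1
  rw [hy, Nat.xor_xor_cancel_right] at this
  omega

-- ediv of -n-1 by 2^k complements the quotient
lemma negSucc_ediv_pow (n k : Nat) :
    (-(n : Int) - 1) / 2 ^ k = -((n / 2 ^ k : Nat) : Int) - 1 := by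
  have hb : (0 : Int) < 2 ^ k := by positivity
  have hdm : (2 ^ k : Nat) * (n / 2 ^ k) + n % 2 ^ k = n := Nat.div_add_mod n (2 ^ k)
  have hlt : n % 2 ^ k < 2 ^ k := Nat.mod_lt _ (by positivity)
  have hone : 1 ≤ (2 : Nat) ^ k := Nat.one_le_two_pow
  refine ((Int.ediv_emod_unique (a := -(n : Int) - 1) (b := 2 ^ k)
      (q := -((n / 2 ^ k : Nat) : Int) - 1) (r := ((2 ^ k - 1 - n % 2 ^ k : Nat) : Int)) hb).mpr
      ⟨?_, by positivity, ?_⟩).1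
  · have hc : ((2 ^ k - 1 - n % 2 ^ k : Nat) : Int)
        = ((2 ^ k : Nat) : Int) - 1 - ((n % 2 ^ k : Nat) : Int) := by
      have : n % 2 ^ k ≤ 2 ^ k - 1 := by omega
      push_cast [Nat.cast_sub this, Nat.cast_sub hone]
      ring
    have hcast : ((2 ^ k : Nat) : Int) * ((n / 2 ^ k : Nat) : Int) + ((n % 2 ^ k : Nat) : Int)
        = (n : Int) := by exact_mod_cast congrArg (fun m : Nat => (m : Int)) hdm
    have hpk : ((2 ^ k : Nat) : Int) = (2 : Int) ^ k := by push_cast; ring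
    rw [hc, ← hpk]
    linarith [hcast]
  · have : ((2 ^ k - 1 - n % 2 ^ k : Nat) : Int) < ((2 ^ k : Nat) : Int) := by
      exact_mod_cast (by omega : 2 ^ k - 1 - n % 2 ^ k < 2 ^ k)
    have hpk : ((2 ^ k : Nat) : Int) = (2 : Int) ^ k := by push_cast; ring
    rw [← hpk]
    exact this

-- bits of a negative integer -n-1 are the complemented bits of n
lemma bit_negSucc (n k : Nat) :
    (-(n : Int) - 1) / 2 ^ k % 2 = if n.testBit k then 0 else 1 := by
  rw [negSucc_ediv_pow, Nat.testBit_eq_decide_div_mod_eq]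
  generalize n / 2 ^ k = m
  rcases Nat.mod_two_eq_zero_or_one m with h | h <;> rw [h] <;> norm_num <;> omega

-- the two elaborations of Python's 1 << i agree
lemma one_shift_cast (i : Nat) : (1 : Int) <<< i = ((1 <<< i : Nat) : Int) := by
  rw [Int.shiftLeft_eq, Nat.shiftLeft_eq, one_mul, one_mul]; push_cast; ring

-- the Python mask (1 << i) | (1 << (i+1)) as a Nat cast
lemma mask_eq (i : Nat) :
    PySem.Int.bor ((1 <<< i : Nat) : Int) ((1 <<< (i + 1) : Nat) : Int) = ((2 ^ i + 2 ^ (i + 1) : Nat) : Int) := by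
  rw [show (1 <<< i : Nat) = 2 ^ i by rw [Nat.shiftLeft_eq, one_mul],
      show (1 <<< (i + 1) : Nat) = 2 ^ (i + 1) by rw [Nat.shiftLeft_eq, one_mul],
      PySem.Int.bor_natCast]
  congr 1
  have h := Nat.two_pow_add_eq_or_of_lt (i := i + 1) (b := 2 ^ i)
    (Nat.pow_lt_pow_right (by norm_num) (by omega)) 1
  simp only [mul_one] at h
  rw [Nat.lor_comm, ← h]
  ring

-- decompose any Int as ↑n or -↑n - 1
lemma int_cases (x : Int) : (∃ n : Nat, x = (n : Int)) ∨ (∃ n : Nat, x = -(n : Int) - 1) := by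
  rcases le_or_gt 0 x with h | h
  · exact Or.inl ⟨x.toNat, by omega⟩
  · exact Or.inr ⟨(-x - 1).toNat, by omega⟩

-- xor with a nonnegative mask, by the sign of x
lemma bxor_ofNat (n m : Nat) : PySem.Int.bxor (n : Int) (m : Int) = ((n ^^^ m : Nat) : Int) :=
  PySem.Int.bxor_natCast n m

lemma bxor_negSucc (n m : Nat) :
    PySem.Int.bxor (-(n : Int) - 1) (m : Int) = -((n ^^^ m : Nat) : Int) - 1 := by
  unfold PySem.Int.bxor
  have h1 : ¬ (0 : Int) ≤ -(n : Int) - 1 := by omega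
  have h2 : (0 : Int) ≤ (m : Int) := by positivity
  simp only [h1, h2, if_true, if_false]
  have h3 : (-(-(n : Int) - 1) - 1).toNat = n := by omega
  have h4 : ((m : Int)).toNat = m := by omega
  rw [h3, h4]

-- a (0,1) bit pair at (i, i+1): the swap is x - 2^i (the 'previous' candidate)
lemma swap_prev (x : Int) (i : Nat) (h1 : x / 2 ^ (i + 1) % 2 = 1) (h0 : x / 2 ^ i % 2 = 0) :
    PySem.Int.bxor x (PySem.Int.bor ((1 <<< i : Nat) : Int) ((1 <<< (i + 1) : Nat) : Int)) = x - 2 ^ i := by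
  rw [mask_eq]
  rcases int_cases x with ⟨n, rfl⟩ | ⟨n, rfl⟩
  · rw [bit_ofNat] at h0 h1
    have hb0 : n.testBit i = false := by by_contra hc; simp [eq_true_of_ne_false hc] at h0
    have hb1 : n.testBit (i + 1) = true := by by_contra hc; simp [eq_false_of_ne_true hc] at h1
    rw [bxor_ofNat]
    have := natSwap i n hb0 hb1
    have hcast : ((n ^^^ (2 ^ i + 2 ^ (i + 1)) : Nat) : Int) + ((2 ^ i : Nat) : Int) = (n : Int) := by
      exact_mod_cast congrArg (fun m : Nat => (m : Int)) this
    push_cast at hcast ⊢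
    linarith
  · rw [bit_negSucc] at h0 h1
    have hb0 : n.testBit i = true := by by_contra hc; simp [eq_false_of_ne_true hc] at h0
    have hb1 : n.testBit (i + 1) = false := by by_contra hc; simp [eq_true_of_ne_false hc] at h1
    rw [bxor_negSucc]
    have := natSwap' i n hb0 hb1
    have hcast : ((n ^^^ (2 ^ i + 2 ^ (i + 1)) : Nat) : Int) = (n : Int) + ((2 ^ i : Nat) : Int) := by
      exact_mod_cast congrArg (fun m : Nat => (m : Int)) this
    push_cast at hcast ⊢
    linarith

-- a (1,0) bit pair at (i, i+1): the swap is x + 2^i (the 'next' candidate)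
lemma swap_next (x : Int) (i : Nat) (h1 : x / 2 ^ (i + 1) % 2 = 0) (h0 : x / 2 ^ i % 2 = 1) :
    PySem.Int.bxor x (PySem.Int.bor ((1 <<< i : Nat) : Int) ((1 <<< (i + 1) : Nat) : Int)) = x + 2 ^ i := by
  rw [mask_eq]
  rcases int_cases x with ⟨n, rfl⟩ | ⟨n, rfl⟩
  · rw [bit_ofNat] at h0 h1
    have hb0 : n.testBit i = true := by by_contra hc; simp [eq_false_of_ne_true hc] at h0
    have hb1 : n.testBit (i + 1) = false := by by_contra hc; simp [eq_true_of_ne_false hc] at h1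
    rw [bxor_ofNat]
    have := natSwap' i n hb0 hb1
    have hcast : ((n ^^^ (2 ^ i + 2 ^ (i + 1)) : Nat) : Int) = (n : Int) + ((2 ^ i : Nat) : Int) := by
      exact_mod_cast congrArg (fun m : Nat => (m : Int)) this
    push_cast at hcast ⊢
    linarith
  · rw [bit_negSucc] at h0 h1
    have hb0 : n.testBit i = false := by by_contra hc; simp [eq_true_of_ne_false hc] at h0
    have hb1 : n.testBit (i + 1) = true := by by_contra hc; simp [eq_false_of_ne_true hc] at h1
    rw [bxor_negSucc]
    have := natSwap i n hb0 hb1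
    have hcast : ((n ^^^ (2 ^ i + 2 ^ (i + 1)) : Nat) : Int) + ((2 ^ i : Nat) : Int) = (n : Int) := by
      exact_mod_cast congrArg (fun m : Nat => (m : Int)) this
    push_cast at hcast ⊢
    linarith

-- if A's next-loop finds something from index i, it is x + 2^j for some j ≥ i
lemma nextLoop_some : ∀ (k i : Nat), i + k = 63 → ∀ (x : Int) (v : Int),
    pvNextLoop x i = some v → ∃ j, i ≤ j ∧ j < 63 ∧ v = x + 2 ^ j := by
  intro k
  induction k with
  | zero =>
    intro i hk x v hv
    rw [pvNextLoop, dif_neg (by omega)] at hv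
    exact absurd hv (by simp)
  | succ k ih =>
    intro i hk x v hv
    rw [pvNextLoop, dif_pos (by omega)] at hv
    by_cases hc : PySem.Int.band (x >>> (i + 1)) 1 == 0 && PySem.Int.band (x >>> i) 1 == 1
    · rw [if_pos hc] at hv
      simp only [Bool.and_eq_true, beq_iff_eq] at hc
      rw [pvBit_eq] at hc
      rw [pvBit_eq] at hc
      refine ⟨i, le_refl i, by omega, ?_⟩
      rw [← Option.some_inj.mp hv]
      simp only [pvSwapAdjacentBits]
      rw [swap_next x i hc.1 hc.2]
    · rw [if_neg hc] at hv
      obtain ⟨j, hj1, hj2, hj3⟩ := ih (i + 1) (by omega) x v hv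
      exact ⟨j, by omega, hj2, hj3⟩

-- if A's prev-loop finds something from index i, it is x - 2^j for some j ≥ i
lemma prevLoop_some : ∀ (k i : Nat), i + k = 63 → ∀ (x : Int) (v : Int),
    pvPrevLoop x i = some v → ∃ j, i ≤ j ∧ j < 63 ∧ v = x - 2 ^ j := by
  intro k
  induction k with
  | zero =>
    intro i hk x v hv
    rw [pvPrevLoop, dif_neg (by omega)] at hv
    exact absurd hv (by simp)
  | succ k ih =>
    intro i hk x v hv
    rw [pvPrevLoop, dif_pos (by omega)] at hv
    by_cases hc : PySem.Int.band (x >>> (i + 1)) 1 == 1 && PySem.Int.band (x >>> i) 1 == 0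
    · rw [if_pos hc] at hv
      simp only [Bool.and_eq_true, beq_iff_eq] at hc
      rw [pvBit_eq] at hc
      rw [pvBit_eq] at hc
      refine ⟨i, le_refl i, by omega, ?_⟩
      rw [← Option.some_inj.mp hv]
      simp only [pvSwapAdjacentBits]
      rw [swap_prev x i hc.1 hc.2]
    · rw [if_neg hc] at hv
      obtain ⟨j, hj1, hj2, hj3⟩ := ih (i + 1) (by omega) x v hv
      exact ⟨j, by omega, hj2, hj3⟩

-- main invariant: from any index, B's single scan equals A's prev/next combination
lemma main_inv : ∀ (k i : Nat), i + k = 63 → ∀ (x : Int),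
    pvAltScan x i = (match pvPrevLoop x i, pvNextLoop x i with
      | none, none => 0
      | some p, none => p
      | none, some n => n
      | some p, some n => if |p - x| < |n - x| then p else n) := by
  intro k
  induction k with
  | zero =>
    intro i hk x
    rw [pvAltScan, pvPrevLoop, pvNextLoop]
    rw [dif_neg (by omega), dif_neg (by omega), dif_neg (by omega)]
  | succ k ih =>
    intro i hk x
    have hi : i < 63 := by omega
    rw [pvAltScan, pvPrevLoop, pvNextLoop, dif_pos hi, dif_pos hi, dif_pos hi]
    have hb0 := pvBit_cases x i
    have hb1 := pvBit_cases x (i + 1)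
    rw [show PySem.Int.band (x >>> i) 1 = x / 2 ^ i % 2 from pvBit_eq x i,
        show PySem.Int.band (x >>> (i + 1)) 1 = x / 2 ^ (i + 1) % 2 from pvBit_eq x (i + 1)]
    rcases hb0 with h0 | h0 <;> rcases hb1 with h1 | h1
    · -- bits equal (0,0): everyone recurses
      rw [h0, h1]
      simp only [bne_self_eq_false, beq_self_eq_true]
      norm_num
      exact ih (i + 1) (by omega) x
    · -- (bit i, bit i+1) = (0, 1): prev fires, next recurses
      rw [h0, h1]
      norm_num
      simp only [pvSwapAdjacentBits]
      rw [one_shift_cast i, one_shift_cast (i + 1), swap_prev x i h1 h0]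
      cases hnx : pvNextLoop x (i + 1) with
      | none => rfl
      | some n =>
        obtain ⟨j, hj1, hj2, hj3⟩ := nextLoop_some (63 - (i + 1)) (i + 1) (by omega) x n hnx
        have habs1 : |x - 2 ^ i - x| = 2 ^ i := by
          rw [show x - 2 ^ i - x = -(2 ^ i : Int) by ring, abs_neg, abs_of_pos (by positivity)]
        have habs2 : |n - x| = 2 ^ j := by
          rw [hj3, show x + 2 ^ j - x = (2 ^ j : Int) by ring, abs_of_pos (by positivity)]
        show x - 2 ^ i = if |x - 2 ^ i - x| < |n - x| then x - 2 ^ i else n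
        rw [habs1, habs2, if_pos (by exact pow_lt_pow_right₀ (by norm_num) (by omega))]
    · -- (1, 0): next fires, prev recurses
      rw [h0, h1]
      norm_num
      simp only [pvSwapAdjacentBits]
      rw [one_shift_cast i, one_shift_cast (i + 1), swap_next x i h1 h0]
      cases hpx : pvPrevLoop x (i + 1) with
      | none => rfl
      | some p =>
        obtain ⟨j, hj1, hj2, hj3⟩ := prevLoop_some (63 - (i + 1)) (i + 1) (by omega) x p hpx
        have habs1 : |x + 2 ^ i - x| = 2 ^ i := by
          rw [show x + 2 ^ i - x = (2 ^ i : Int) by ring, abs_of_pos (by positivity)]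
        have habs2 : |p - x| = 2 ^ j := by
          rw [hj3, show x - 2 ^ j - x = -(2 ^ j : Int) by ring, abs_neg, abs_of_pos (by positivity)]
        show x + 2 ^ i = if |p - x| < |x + 2 ^ i - x| then p else x + 2 ^ i
        rw [habs2, habs1, if_neg (by
          have : (2 : Int) ^ i < 2 ^ j := pow_lt_pow_right₀ (by norm_num) (by omega)
          omega)]
    · -- bits equal (1,1): everyone recurses
      rw [h0, h1]
      simp only [bne_self_eq_false, beq_self_eq_true]
      norm_num
      exact ih (i + 1) (by omega) x

-- ===== VERDICT (by name: the statement is the Claim_ definition above) =====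
theorem closest_int_same_bit_count_1_spec : Claim_equal_closest_int_same_bit_count_1 := by
  intro x _ _
  unfold Spec_closest_int_same_bit_count_1 closest_int_same_bit_count_1 closest_int_same_bit_count_1_alt
  exact (main_inv 63 0 rfl x).symm
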